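-- pv_equiv track=rewrite | github.com/yudi6/AI_Lab | Lab6/code/RNN/RNN.py | GetSentenceTag
-- ===== SOURCE A (Python) =====
-- def GetSentenceTag(sentence_set, termset):
--     # 返回的标签序列 初始化全为‘O’
--     sentence_tag = ['O' for i in range(len(sentence_set))]
--     for term in termset:
--         # 对于每个关键词进行分词得到集合
--         term_split = term.split()
--         begin = term_split[0]
--         # 关键短语的开始词标志为‘B’
--         if begin in sentence_set:
--             sentence_tag[sentence_set.index(begin)] = 'B'
--         # 关键短语的其余词标志为‘I’
--         for i in range(1, len(term_split)):
--             in_t = term_split[i]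
--             if in_t in sentence_set:
--                 sentence_tag[sentence_set.index(in_t)] = 'I'
--     return sentence_tag
-- ===== SOURCE B (Python) =====
-- def GetSentenceTag(sentence_set, termset):
--     # Build word -> tag table once (last write wins, like A's sequential overwrites),
--     # then apply it to the first occurrence of each word in a single pass.
--     tag_of = {}
--     for term in termset:
--         parts = term.split()
--         tag_of[parts[0]] = 'B'
--         for w in parts[1:]:
--             tag_of[w] = 'I'
--     sentence_tag = ['O'] * len(sentence_set)
--     for word, tag in tag_of.items():
--         if word in sentence_set:
--             sentence_tag[sentence_set.index(word)] = tag
--     return sentence_tag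
-- ===== Notes on version B (the rewrite author's own statement) =====
-- stated objective: alternative
-- what changed: B first builds a word->tag dict over all terms (last write wins) and then applies it to the all-'O' tag list in a separate pass, so each distinct word is searched in sentence_set once instead of once per occurrence across terms.
import Mathlib
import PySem

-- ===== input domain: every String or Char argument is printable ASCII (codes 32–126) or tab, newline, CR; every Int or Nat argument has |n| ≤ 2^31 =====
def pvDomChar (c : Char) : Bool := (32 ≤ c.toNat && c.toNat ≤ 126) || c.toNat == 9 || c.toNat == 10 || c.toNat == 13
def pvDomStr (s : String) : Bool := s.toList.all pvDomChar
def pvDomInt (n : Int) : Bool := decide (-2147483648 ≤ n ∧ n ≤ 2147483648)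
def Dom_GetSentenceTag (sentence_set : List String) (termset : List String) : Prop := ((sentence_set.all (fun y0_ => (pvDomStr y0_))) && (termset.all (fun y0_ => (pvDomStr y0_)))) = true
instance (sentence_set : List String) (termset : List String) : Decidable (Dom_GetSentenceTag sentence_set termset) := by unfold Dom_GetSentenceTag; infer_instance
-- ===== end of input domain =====

-- B builds a word→tag dict over all terms first, then applies it to the tag list in a
-- separate pass (A interleaves lookups and writes per term); alternative decomposition, same results.


-- shared Python line `if w in sentence_set: sentence_tag[sentence_set.index(w)] = t`
-- (both programs contain it verbatim; the `in` guard makes `.index` total)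
def pvSetTag (sset : List String) (tag : List String) (w : String) (t : String) : List String :=
  if sset.contains w then tag.set (sset.idxOf w) t else tag

-- ===== PORT A =====
def GetSentenceTag (sentence_set : List String) (termset : List String) : List String :=
  termset.foldl
    (fun tag term =>
      match PySem.Str.split₀ term with
      | [] => tag          -- Python raises IndexError here (term_split[0]); excluded by Pre_
      | b :: rest =>
        let tag := pvSetTag sentence_set tag b "B"
        rest.foldl (fun tag w => pvSetTag sentence_set tag w "I") tag)
    (sentence_set.map (fun _ => "O"))

-- ===== PORT B =====
def pvBuildDict (termset : List String) : PySem.Dict String String :=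
  termset.foldl
    (fun d term =>
      match PySem.Str.split₀ term with
      | [] => d            -- Python raises IndexError here (parts[0]); excluded by Pre_
      | b :: rest => rest.foldl (fun d w => d.insert w "I") (d.insert b "B"))
    PySem.Dict.empty

def GetSentenceTag_alt (sentence_set : List String) (termset : List String) : List String :=
  (pvBuildDict termset).items.foldl
    (fun tag kv => pvSetTag sentence_set tag kv.1 kv.2)
    (sentence_set.map (fun _ => "O"))

-- ===== PRECONDITION & SPEC =====
-- Pre_ excludes exactly the terms whose .split() is empty (empty/whitespace-only term), on which
-- Python A raises IndexError at term_split[0].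
def Pre_GetSentenceTag (sentence_set : List String) (termset : List String) : Prop :=
  ∀ term ∈ termset, PySem.Str.split₀ term ≠ []
instance (sentence_set : List String) (termset : List String) : Decidable (Pre_GetSentenceTag sentence_set termset) := by unfold Pre_GetSentenceTag; infer_instance
def pvWitness_GetSentenceTag : List String × List String := (["the", "cat", "sat"], ["the cat", "sat"])

def Spec_GetSentenceTag (sentence_set : List String) (termset : List String) (out : List String) : Prop := out = GetSentenceTag_alt sentence_set termset
instance (sentence_set : List String) (termset : List String) (out : List String) : Decidable (Spec_GetSentenceTag sentence_set termset out) := by unfold Spec_GetSentenceTag; infer_instance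

-- ===== CLAIM (what is proved, stated in full; the proofs are below) =====
def Claim_equal_GetSentenceTag : Prop := ∀ (sentence_set : List String) (termset : List String), Dom_GetSentenceTag sentence_set termset → Pre_GetSentenceTag sentence_set termset → Spec_GetSentenceTag sentence_set termset (GetSentenceTag sentence_set termset)

-- ===== LEMMAS AND PROOFS =====

-- apply a list of (word, tag) assignment events in order
def pvApplyAll (sset : List String) (E : List (String × String)) (tag : List String) : List String :=
  E.foldl (fun tag kv => pvSetTag sset tag kv.1 kv.2) tag

-- the (word, tag) assignment events a term generates, in A's order
def pvEvents (term : String) : List (String × String) :=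
  match PySem.Str.split₀ term with
  | [] => []
  | b :: rest => (b, "B") :: rest.map (fun w => (w, "I"))

lemma pvSetTag_comm (sset tag : List String) {w w' : String} (t t' : String) (h : w ≠ w') :
    pvSetTag sset (pvSetTag sset tag w t) w' t' = pvSetTag sset (pvSetTag sset tag w' t') w t := by
  by_cases hw : w ∈ sset <;> by_cases hw' : w' ∈ sset <;> simp [pvSetTag, hw, hw']
  have hiw := List.idxOf_lt_length_of_mem hw
  have hiw' := List.idxOf_lt_length_of_mem hw'
  have hne : sset.idxOf w ≠ sset.idxOf w' := by
    intro he
    have h1 : sset[sset.idxOf w]? = some w := by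
      rw [List.getElem?_eq_getElem hiw, List.getElem_idxOf hiw]
    have h2 : sset[sset.idxOf w']? = some w' := by
      rw [List.getElem?_eq_getElem hiw', List.getElem_idxOf hiw']
    rw [he, h2] at h1
    exact h (Option.some.inj h1).symm
  exact List.set_comm _ _ hne

lemma pvSetTag_overwrite (sset tag : List String) (w t t' : String) :
    pvSetTag sset (pvSetTag sset tag w t) w t' = pvSetTag sset tag w t' := by
  by_cases hw : w ∈ sset <;> simp [pvSetTag, hw, List.set_set]

lemma pvApplyAll_setTag_comm (sset : List String) (L : List (String × String)) (tag : List String)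
    (w t : String) (hw : w ∉ L.map Prod.fst) :
    pvApplyAll sset L (pvSetTag sset tag w t) = pvSetTag sset (pvApplyAll sset L tag) w t := by
  induction L generalizing tag with
  | nil => rfl
  | cons p L ih =>
    simp only [List.map_cons, List.mem_cons, not_or] at hw
    simp only [pvApplyAll, List.foldl_cons]
    rw [pvSetTag_comm sset tag t p.2 (fun he => hw.1 he)]
    exact ih _ hw.2

-- appending an assignment to key w equals overwriting w's entry in place, given unique keys
lemma pvApplyAll_append_overwrite (sset : List String) (L : List (String × String))
    (w t : String) (hnd : (L.map Prod.fst).Nodup) (hw : w ∈ L.map Prod.fst) (tag : List String) :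
    pvApplyAll sset (L ++ [(w, t)]) tag
      = pvApplyAll sset (L.map (fun p => if p.1 == w then (w, t) else p)) tag := by
  induction L generalizing tag with
  | nil => simp at hw
  | cons p L ih =>
    simp only [List.map_cons, List.nodup_cons] at hnd
    by_cases hpw : p.1 = w
    · have hwL : w ∉ L.map Prod.fst := hpw ▸ hnd.1
      have hmap : L.map (fun p => if p.1 == w then (w, t) else p) = L := by
        conv_rhs => rw [← List.map_id L]
        apply List.map_congr_left
        intro q hq
        have : q.1 ≠ w := fun he => hwL (he ▸ List.mem_map_of_mem hq)
        simp [this]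
      simp only [List.cons_append, pvApplyAll, List.foldl_cons, List.map_cons, hpw,
        BEq.rfl, if_true, hmap]
      show pvApplyAll sset (L ++ [(w, t)]) (pvSetTag sset tag w p.2)
        = pvApplyAll sset L (pvSetTag sset tag w t)
      rw [pvApplyAll, List.foldl_append]
      show pvSetTag sset (pvApplyAll sset L (pvSetTag sset tag w p.2)) w t = _
      rw [pvApplyAll_setTag_comm sset L _ w p.2 hwL, pvSetTag_overwrite,
        ← pvApplyAll_setTag_comm sset L _ w t hwL]
    · have hw' : w ∈ L.map Prod.fst := by
        rcases List.mem_cons.mp hw with h | h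
        · exact absurd h.symm hpw
        · exact h
      have : (p.1 == w) = false := by simp [hpw]
      simp only [List.cons_append, pvApplyAll, List.foldl_cons, List.map_cons, this]
      exact ih hnd.2 hw' _

-- the core: folding events into a dict then applying its items = applying the events in order
lemma pvApplyAll_dict (sset : List String) (E : List (String × String))
    (d : PySem.Dict String String) (hnd : d.keys.Nodup) (tag : List String) :
    pvApplyAll sset ((E.foldl (fun d kv => d.insert kv.1 kv.2) d).items) tag
      = pvApplyAll sset E (pvApplyAll sset d.items tag) := by
  induction E generalizing d tag with
  | nil => rfl
  | cons kv E ih =>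
    have happ : pvApplyAll sset (d.items ++ [(kv.1, kv.2)]) tag
        = pvSetTag sset (pvApplyAll sset d.items tag) kv.1 kv.2 := by
      rw [pvApplyAll, List.foldl_append]; rfl
    have hndl : (d.items.map Prod.fst).Nodup := hnd
    have key : pvApplyAll sset (d.insert kv.1 kv.2).items tag
        = pvSetTag sset (pvApplyAll sset d.items tag) kv.1 kv.2 := by
      by_cases hc : d.contains kv.1 = true
      · have hw : kv.1 ∈ d.items.map Prod.fst := (PySem.Dict.contains_iff_mem_keys d kv.1).mp hc
        rw [PySem.Dict.items_insert_of_contains d kv.2 hc,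
          ← pvApplyAll_append_overwrite sset d.items kv.1 kv.2 hndl hw tag, happ]
      · rw [PySem.Dict.items_insert_of_not_contains d kv.2 (by simpa using hc), happ]
    simp only [List.foldl_cons]
    rw [ih (d.insert kv.1 kv.2) (PySem.Dict.nodup_keys_insert _ _ _ hnd) tag, key]
    rfl

-- A is the sequential application of all events
lemma portA_fold (sset ts tag : List String) :
    ts.foldl
      (fun tag term =>
        match PySem.Str.split₀ term with
        | [] => tag
        | b :: rest =>
          let tag := pvSetTag sset tag b "B"
          rest.foldl (fun tag w => pvSetTag sset tag w "I") tag) tag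
      = pvApplyAll sset (ts.flatMap pvEvents) tag := by
  induction ts generalizing tag with
  | nil => rfl
  | cons term ts ih =>
    simp only [List.foldl_cons, List.flatMap_cons]
    have hsplit : pvApplyAll sset (pvEvents term ++ ts.flatMap pvEvents) tag
        = pvApplyAll sset (ts.flatMap pvEvents) (pvApplyAll sset (pvEvents term) tag) := by
      simp [pvApplyAll, List.foldl_append]
    rw [hsplit, ← ih]
    congr 1
    unfold pvEvents
    cases h : PySem.Str.split₀ term with
    | nil => rfl
    | cons b rest => simp [pvApplyAll, List.foldl_map]

lemma portA_eq_applyAll (sset ts : List String) :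
    GetSentenceTag sset ts
      = pvApplyAll sset (ts.flatMap pvEvents) (sset.map (fun _ => "O")) := by
  rw [GetSentenceTag]
  exact portA_fold sset ts _

-- B's dict is the insert-fold of all events
lemma buildDict_fold (ts : List String) (d : PySem.Dict String String) :
    ts.foldl
      (fun d term =>
        match PySem.Str.split₀ term with
        | [] => d
        | b :: rest => rest.foldl (fun d w => d.insert w "I") (d.insert b "B")) d
      = (ts.flatMap pvEvents).foldl (fun d kv => d.insert kv.1 kv.2) d := by
  induction ts generalizing d with
  | nil => rfl
  | cons term ts ih =>
    simp only [List.foldl_cons, List.flatMap_cons, List.foldl_append]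
    rw [ih]
    congr 1
    unfold pvEvents
    cases h : PySem.Str.split₀ term with
    | nil => rfl
    | cons b rest => simp [List.foldl_map]

lemma portB_eq_applyAll (sset ts : List String) :
    GetSentenceTag_alt sset ts
      = pvApplyAll sset
          ((ts.flatMap pvEvents).foldl (fun d kv => d.insert kv.1 kv.2) PySem.Dict.empty).items
          (sset.map (fun _ => "O")) := by
  rw [GetSentenceTag_alt, pvBuildDict, buildDict_fold]
  rfl

-- ===== VERDICT (by name: the statement is the Claim_ definition above) =====
theorem GetSentenceTag_spec : Claim_equal_GetSentenceTag := by
  intro sset ts _ _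
  show GetSentenceTag sset ts = GetSentenceTag_alt sset ts
  rw [portA_eq_applyAll, portB_eq_applyAll,
    pvApplyAll_dict sset _ PySem.Dict.empty (by simp [pysem]) _]
  rfl
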